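-- pv_equiv track=rewrite | github.com/KubiakJakub01/ProjectEuler | Problem111.py | define_results
-- ===== SOURCE A (Python) =====
-- from collections import defaultdict, Counter
--
-- def define_results(possible_primes):
--     digits_quantity_sum_dict = defaultdict(lambda: [0, 0])
--     for number in possible_primes:
--         number_str = str(number)
--         digit, occurency = Counter(number_str).most_common(1)[0]
--         if occurency > digits_quantity_sum_dict[digit][0]:
--             digits_quantity_sum_dict[digit] = [occurency, number]
--         elif occurency == digits_quantity_sum_dict[digit][0]:
--             digits_quantity_sum_dict[digit][1] += number
--     return digits_quantity_sum_dict
-- ===== SOURCE B (Python) =====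
-- from collections import defaultdict, Counter
--
-- def define_results(possible_primes):
--     # group-then-reduce: index numbers by their most-common digit, then reduce each group
--     index = defaultdict(list)
--     for number in possible_primes:
--         digit, occurrence = Counter(str(number)).most_common(1)[0]
--         index[digit].append((occurrence, number))
--     result = defaultdict(lambda: [0, 0])
--     for digit, group in index.items():
--         m = max(occ for occ, _ in group)
--         s = sum(n for occ, n in group if occ == m)
--         result[digit] = [m, s]
--     return result
-- ===== Notes on version B (the rewrite author's own statement) =====
-- stated objective: alternative
-- what changed: A's single streaming defaultdict accumulator (running max/sum updated per number) is replaced by a two-pass group-then-reduce: first index numbers by their most-common digit, then for each group take the max occurrence and sum the numbers tied at it.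
import Mathlib
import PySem

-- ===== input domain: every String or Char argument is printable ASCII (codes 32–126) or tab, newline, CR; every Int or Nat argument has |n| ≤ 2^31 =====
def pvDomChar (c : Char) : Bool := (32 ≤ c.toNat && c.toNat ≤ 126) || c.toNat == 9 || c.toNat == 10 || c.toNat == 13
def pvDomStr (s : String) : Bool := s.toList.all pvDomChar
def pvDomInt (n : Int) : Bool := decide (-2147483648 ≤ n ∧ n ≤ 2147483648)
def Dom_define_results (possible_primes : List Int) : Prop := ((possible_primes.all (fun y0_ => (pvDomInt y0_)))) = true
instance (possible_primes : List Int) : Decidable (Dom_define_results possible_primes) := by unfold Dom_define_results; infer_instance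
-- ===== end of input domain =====

-- B replaces A's single streaming max/sum accumulator with a group-then-reduce two-pass
-- shape (index numbers by their most-common digit, then reduce each group); objective: alternative.

-- shared helper: Counter(str(number)).most_common(1)[0] — the FIRST key of maximal count
-- (the '0' fallback is unreachable: str(number) is never empty)
def pvMostCommon1 (number : Int) : Char × Int :=
  match (PySem.Dict.counter (PySem.Int.toChars number)).items with
  | [] => ('0', 0)
  | p :: rest => rest.foldl (fun best q => if best.2 < q.2 then q else best) p

-- ===== PORT A =====
-- loop body of A; the 2-element list value [occ, num] is represented as a pair and
-- rendered as the list [occ, num] when the dict is returned (both ports render alike)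
def pvStepA (d : PySem.Dict Char (Int × Int)) (number : Int) : PySem.Dict Char (Int × Int) :=
  let digit := (pvMostCommon1 number).1
  let occurency := (pvMostCommon1 number).2
  -- defaultdict: accessing digits_quantity_sum_dict[digit] materialises [0, 0]
  let d := if d.contains digit then d else d.insert digit ((0 : Int), (0 : Int))
  let cur := d.getD digit (0, 0)
  if cur.1 < occurency then d.insert digit (occurency, number)
  else if occurency == cur.1 then d.insert digit (cur.1, cur.2 + number)
  else d

def define_results (possible_primes : List Int) : List (String × List Int) :=
  (possible_primes.foldl pvStepA (PySem.Dict.mk [])).items.map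
    (fun p => (String.mk [p.1], [p.2.1, p.2.2]))

-- ===== PORT B =====
-- reduce of one group: m = max occurrence, s = sum of the numbers tied at m
-- (every occurrence in a real group is ≥ 1, so the 0 base of the running max is inert)
def pvReduceGroup (g : List (Int × Int)) : Int × Int :=
  let m := g.foldl (fun acc q => max acc q.1) 0
  (m, ((g.filter (fun q => q.1 == m)).map (fun q => q.2)).sum)

-- pass 1 body of B: index[digit].append((occurrence, number))
def pvStepB (d : PySem.Dict Char (List (Int × Int))) (number : Int) :
    PySem.Dict Char (List (Int × Int)) :=
  let digit := (pvMostCommon1 number).1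
  d.insert digit (d.getD digit [] ++ [((pvMostCommon1 number).2, number)])

def define_results_alt (possible_primes : List Int) : List (String × List Int) :=
  (possible_primes.foldl pvStepB (PySem.Dict.mk [])).items.map
    (fun p => (String.mk [p.1], [(pvReduceGroup p.2).1, (pvReduceGroup p.2).2]))

-- ===== PRECONDITION & SPEC =====
def Spec_define_results (possible_primes : List Int) (out : List (String × List Int)) : Prop := out = define_results_alt possible_primes
instance (possible_primes : List Int) (out : List (String × List Int)) : Decidable (Spec_define_results possible_primes out) := by unfold Spec_define_results; infer_instance

-- ===== CLAIM (what is proved, stated in full; the proofs are below) =====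
def Claim_equal_define_results : Prop := ∀ (possible_primes : List Int), Dom_define_results possible_primes → Spec_define_results possible_primes (define_results possible_primes)

-- ===== LEMMAS AND PROOFS =====

-- proof-side view of one of B's index entries through the reduce
def pvF (p : Char × List (Int × Int)) : Char × (Int × Int) := (p.1, pvReduceGroup p.2)

-- appending one (occ, number) to a group updates its reduce exactly like A's branches
lemma pvRed_append (g : List (Int × Int)) (o n : Int) :
    pvReduceGroup (g ++ [(o, n)]) =
      (if (pvReduceGroup g).1 < o then (o, n)
       else if o == (pvReduceGroup g).1 then ((pvReduceGroup g).1, (pvReduceGroup g).2 + n)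
       else pvReduceGroup g) := by
  have hb := PySem.List.le_foldl_max_int g (fun q => q.1) 0
  simp only [pvReduceGroup, List.foldl_append, List.foldl_cons, List.foldl_nil,
    List.filter_append] at *
  set m := g.foldl (fun acc q => max acc q.1) 0 with hm
  rcases lt_trichotomy m o with h | h | h
  · have hmax : max m o = o := by omega
    have hfilt : g.filter (fun q => q.1 == o) = [] := by
      rw [List.filter_eq_nil_iff]; intro q hq
      have := hb.2 q hq; simp; omega
    simp [hmax, h, hfilt]
  · have hmax : max m o = m := by omega
    subst h
    simp [hmax]
  · have hmax : max m o = m := by omega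
    have hno : ¬ (m < o) := by omega
    have hne : ¬ (o == m) = true := by simp; omega
    simp [hmax, hno, hne]

lemma pvGet?_map (ls : List (Char × List (Int × Int))) (k : Char) :
    (PySem.Dict.mk (ls.map pvF)).get? k = ((PySem.Dict.mk ls).get? k).map pvReduceGroup := by
  simp only [PySem.Dict.get?, List.find?_map]
  have : ((fun p : Char × (Int × Int) => p.1 == k) ∘ pvF) = (fun p => p.1 == k) := by
    funext p; simp [pvF]
  rw [this]
  cases ls.find? (fun p => p.1 == k) <;> simp [pvF]

lemma pvContains_map (ls : List (Char × List (Int × Int))) (k : Char) :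
    (PySem.Dict.mk (ls.map pvF)).contains k = (PySem.Dict.mk ls).contains k := by
  simp only [PySem.Dict.contains, List.any_map]
  congr 1

lemma pvRed_single (o n : Int) :
    pvReduceGroup [(o, n)] =
      (if 0 < o then (o, n) else if o == 0 then ((0 : Int), n) else ((0 : Int), (0 : Int))) := by
  have := pvRed_append [] o n
  simpa [pvReduceGroup] using this

-- one loop step: A's accumulator is B's index viewed through the reduce
lemma pvStep_items (e : PySem.Dict Char (List (Int × Int))) (n : Int) (hnd : e.keys.Nodup) :
    (pvStepA (PySem.Dict.mk (e.items.map pvF)) n).items = (pvStepB e n).items.map pvF := by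
  set k := (pvMostCommon1 n).1 with hk
  set o := (pvMostCommon1 n).2 with ho
  set d : PySem.Dict Char (Int × Int) := PySem.Dict.mk (e.items.map pvF) with hd
  have hconta : d.contains k = e.contains k := by
    have := pvContains_map e.items k
    simpa [hd] using this
  by_cases hc : e.contains k = true
  · -- key already present
    obtain ⟨g, hg⟩ : ∃ g, e.get? k = some g := by
      rw [PySem.Dict.contains_eq_isSome_get?] at hc
      exact Option.isSome_iff_exists.mp hc
    have hgd : e.getD k [] = g := PySem.Dict.getD_of_get?_eq_some e [] hg
    have hcur : d.getD k (0, 0) = pvReduceGroup g := by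
      have := pvGet?_map e.items k
      simp only [PySem.Dict.getD, hd, this]
      simp [show (PySem.Dict.mk e.items) = e from rfl, hg]
    have hBitems : (pvStepB e n).items
        = e.items.map (fun q => if q.1 == k then (k, g ++ [(o, n)]) else q) := by
      simp only [pvStepB, ← hk, ← ho, hgd]
      exact PySem.Dict.items_insert_of_contains e _ hc
    have hred := pvRed_append g o n
    have hval : ∀ p ∈ e.items, p.1 = k → p.2 = g := by
      intro p hp hpk
      have : e.get? p.1 = some p.2 := PySem.Dict.get?_of_mem_items e (by simpa using hp) hnd
      rw [hpk, hg] at this; exact (Option.some.inj this).symm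
    have hdc : d.contains k = true := by rw [hconta]; exact hc
    simp only [pvStepA, ← hk, ← ho, hdc, if_true, hcur]
    by_cases h1 : (pvReduceGroup g).1 < o
    · rw [if_pos h1, PySem.Dict.items_insert_of_contains d _ hdc, hBitems, hd]
      simp only [PySem.Dict.items, List.map_map]
      apply List.map_congr_left
      intro p hp
      by_cases hpk : p.1 = k
      · simp [pvF, Function.comp, hpk, hred, h1]
      · simp [pvF, Function.comp, hpk]
    · rw [if_neg h1]
      by_cases h2 : (o == (pvReduceGroup g).1) = true
      · rw [if_pos h2, PySem.Dict.items_insert_of_contains d _ hdc, hBitems, hd]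
        simp only [PySem.Dict.items, List.map_map]
        apply List.map_congr_left
        intro p hp
        by_cases hpk : p.1 = k
        · simp [pvF, Function.comp, hpk, hred, h1, h2]
        · simp [pvF, Function.comp, hpk]
      · rw [if_neg h2, hBitems, hd]
        simp only [PySem.Dict.items, List.map_map]
        apply List.map_congr_left
        intro p hp
        by_cases hpk : p.1 = k
        · have hpg := hval p hp hpk
          simp [pvF, Function.comp, hpk, hred, h1, h2, hpg]
        · simp [pvF, Function.comp, hpk]
  · -- fresh key
    have hcf : e.contains k = false := by simpa using hc
    have hdcf : d.contains k = false := by rw [hconta]; exact hcf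
    have hgd : e.getD k [] = [] := PySem.Dict.getD_of_not_contains e [] hcf
    have hBitems : (pvStepB e n).items = e.items ++ [(k, [(o, n)])] := by
      simp only [pvStepB, ← hk, ← ho, hgd, List.nil_append]
      exact PySem.Dict.items_insert_of_not_contains e _ hcf
    have hins : (d.insert k ((0:Int), (0:Int))).getD k (0, 0) = ((0:Int), (0:Int)) :=
      PySem.Dict.getD_insert_self d k _ _
    have hcoll : ∀ v : Int × Int, (d.insert k ((0:Int),(0:Int))).insert k v = d.insert k v :=
      fun v => PySem.Dict.insert_insert_self d k _ v
    have hsingle := pvRed_single o n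
    simp only [pvStepA, ← hk, ← ho, hdcf, Bool.false_eq_true, if_false, hins, hcoll]
    rw [hBitems, List.map_append]
    have hitems3 : ∀ v : Int × Int, (d.insert k v).items = d.items ++ [(k, v)] :=
      fun v => PySem.Dict.items_insert_of_not_contains d v hdcf
    rcases lt_trichotomy (0 : Int) o with h1 | h1 | h1
    · rw [if_pos h1, hitems3, hd]
      simp [pvF, hsingle, h1]
    · rw [if_neg (show ¬ ((0:Int) < o) by omega),
        if_pos (show (o == (0:Int)) = true by simp [← h1]), hitems3, hd]
      simp [pvF, ← h1, pvReduceGroup]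
    · have hno : ¬ ((0:Int) < o) := by omega
      have hne : ¬ (o == (0:Int)) = true := by simp; omega
      rw [if_neg hno, if_neg hne, hitems3, hd]
      simp [pvF, hsingle, hno, hne]

lemma pvStepB_nodup (e : PySem.Dict Char (List (Int × Int))) (n : Int) (hnd : e.keys.Nodup) :
    (pvStepB e n).keys.Nodup := by
  simp only [pvStepB]
  exact PySem.Dict.nodup_keys_insert e _ _ hnd

lemma pvFold_items (ps : List Int) :
    ∀ (e : PySem.Dict Char (List (Int × Int))), e.keys.Nodup →
      (ps.foldl pvStepA (PySem.Dict.mk (e.items.map pvF))).items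
        = (ps.foldl pvStepB e).items.map pvF := by
  induction ps with
  | nil => intro e _; simp
  | cons n ps ih =>
    intro e hnd
    simp only [List.foldl_cons]
    rw [show pvStepA (PySem.Dict.mk (e.items.map pvF)) n
          = PySem.Dict.mk ((pvStepB e n).items.map pvF) from
        PySem.Dict.ext (pvStep_items e n hnd)]
    exact ih (pvStepB e n) (pvStepB_nodup e n hnd)

-- ===== VERDICT (by name: the statement is the Claim_ definition above) =====
theorem define_results_spec : Claim_equal_define_results := by
  intro ps _
  unfold Spec_define_results
  have h := pvFold_items ps (PySem.Dict.mk []) (by simp [PySem.Dict.keys])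
  simp only [PySem.Dict.items, List.map_nil] at h
  simp only [define_results, define_results_alt, h, List.map_map]
  rfl
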